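-- pv_equiv track=rewrite | github.com/RAnu-0512/recommend_travel | read_reviews_info.py | remove_duplicate_reviews
-- ===== SOURCE A (Python) =====
-- def remove_duplicate_reviews(entAndRevPair):
--     review_to_pair = {}
--
--     for pair in entAndRevPair:
--         review = pair['review']
--         entity = pair['entity']
--
--         # レビューがすでに辞書に存在する場合
--         if review in review_to_pair:
--             existing_entity = review_to_pair[review]['entity']
--             # エンティティの長さを比較し、長い方を保持
--             if len(entity) > len(existing_entity):
--                 review_to_pair[review] = pair
--         else:
--             review_to_pair[review] = pair
--
--     # 重複を除いたペアのリストを作成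
--     filtered_pairs = list(review_to_pair.values())
--     return filtered_pairs
-- ===== SOURCE B (Python) =====
-- def remove_duplicate_reviews(entAndRevPair):
--     groups = {}
--     for pair in entAndRevPair:
--         groups.setdefault(pair['review'], []).append(pair)
--     return [max(g, key=lambda p: len(p['entity'])) for g in groups.values()]
-- ===== Notes on version B (the rewrite author's own statement) =====
-- stated objective: alternative
-- what changed: Replaces A's online running-max (one dict holding the best pair seen so far, updated with a strict length comparison) by a group-then-reduce: one pass builds a dict mapping each review to the list of all its pairs, then max(group, key=len entity) picks the kept pair per group.
import Mathlib
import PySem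

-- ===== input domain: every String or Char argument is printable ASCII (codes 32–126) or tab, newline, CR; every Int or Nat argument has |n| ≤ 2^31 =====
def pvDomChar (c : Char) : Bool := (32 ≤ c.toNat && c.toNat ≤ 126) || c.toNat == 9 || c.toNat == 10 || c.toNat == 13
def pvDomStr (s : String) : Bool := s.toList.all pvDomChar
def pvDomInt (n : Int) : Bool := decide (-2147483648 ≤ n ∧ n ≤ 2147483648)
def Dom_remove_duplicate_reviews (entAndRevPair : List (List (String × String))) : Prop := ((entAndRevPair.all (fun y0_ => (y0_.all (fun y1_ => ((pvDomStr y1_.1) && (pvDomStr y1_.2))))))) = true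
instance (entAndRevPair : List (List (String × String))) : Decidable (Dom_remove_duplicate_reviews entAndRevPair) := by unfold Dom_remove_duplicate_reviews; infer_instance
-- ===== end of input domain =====

-- B replaces A's online running-max over one dict with a group-then-reduce (dict of groups,
-- then max(group, key=len entity)); objective: alternative decomposition, same cost.

-- shared primitive: Python's pair[k] lookup on the assoc-list representation of a dict
def pvGetKey (p : List (String × String)) (k : String) : Option String :=
  (PySem.Dict.mk p).get? k

-- ===== PORT A =====
def pyStepA (d : PySem.Dict String (List (String × String))) (pair : List (String × String)) :
    PySem.Dict String (List (String × String)) :=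
  let review := (pvGetKey pair "review").getD ""
  let entity := (pvGetKey pair "entity").getD ""
  if d.contains review then
    let existing_entity := (pvGetKey (d.getD review []) "entity").getD ""
    if PySem.Str.len entity > PySem.Str.len existing_entity then d.insert review pair else d
  else d.insert review pair

def remove_duplicate_reviews (entAndRevPair : List (List (String × String))) : List (List (String × String)) :=
  (entAndRevPair.foldl pyStepA PySem.Dict.empty).values

-- ===== PORT B =====
def pvEntLen (p : List (String × String)) : Int :=
  PySem.Str.len ((pvGetKey p "entity").getD "")

-- groups.setdefault(pair['review'], []).append(pair)
def pyStepB (d : PySem.Dict String (List (List (String × String)))) (pair : List (String × String)) :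
    PySem.Dict String (List (List (String × String))) :=
  d.modify ((pvGetKey pair "review").getD "") [] (· ++ [pair])

def remove_duplicate_reviews_alt (entAndRevPair : List (List (String × String))) : List (List (String × String)) :=
  ((entAndRevPair.foldl pyStepB PySem.Dict.empty).values).map
    (fun g => (PySem.List.max? g pvEntLen).getD [])

-- ===== PRECONDITION & SPEC =====
-- Pre_ excludes exactly the inputs where some pair lacks a 'review' or 'entity' key,
-- on which the Python A raises KeyError (B raises there too).
def Pre_remove_duplicate_reviews (entAndRevPair : List (List (String × String))) : Prop :=
  ∀ p ∈ entAndRevPair, (pvGetKey p "review").isSome ∧ (pvGetKey p "entity").isSome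

instance (entAndRevPair : List (List (String × String))) : Decidable (Pre_remove_duplicate_reviews entAndRevPair) := by
  unfold Pre_remove_duplicate_reviews; infer_instance

def pvWitness_remove_duplicate_reviews : (List (List (String × String))) :=
  [[("review", "r1"), ("entity", "ab")], [("review", "r1"), ("entity", "c")], [("review", "r2"), ("entity", "z")]]

def Spec_remove_duplicate_reviews (entAndRevPair : List (List (String × String))) (out : List (List (String × String))) : Prop := out = remove_duplicate_reviews_alt entAndRevPair
instance (entAndRevPair : List (List (String × String))) (out : List (List (String × String))) : Decidable (Spec_remove_duplicate_reviews entAndRevPair out) := by unfold Spec_remove_duplicate_reviews; infer_instance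

-- ===== CLAIM (what is proved, stated in full; the proofs are below) =====
def Claim_equal_remove_duplicate_reviews : Prop := ∀ (entAndRevPair : List (List (String × String))), Dom_remove_duplicate_reviews entAndRevPair → Pre_remove_duplicate_reviews entAndRevPair → Spec_remove_duplicate_reviews entAndRevPair (remove_duplicate_reviews entAndRevPair)

-- ===== LEMMAS AND PROOFS =====

-- one appended element updates a first-maximum exactly by A's strict comparison
theorem pv_max?_append_singleton {α : Type} (g : List α) (p : α) (key : α → Int) :
    PySem.List.max? (g ++ [p]) key =
      match PySem.List.max? g key with
      | none => some p
      | some m => if key m < key p then some p else some m := by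
  unfold PySem.List.max?
  rw [List.foldl_append]
  rfl

-- the invariant relating A's best-so-far dict to B's group dict
def pvRel (dA : PySem.Dict String (List (String × String)))
    (dB : PySem.Dict String (List (List (String × String)))) : Prop :=
  dA.keys = dB.keys ∧ dA.keys.Nodup ∧
  ∀ k, dA.get? k = PySem.List.max? (dB.getD k []) pvEntLen

theorem pv_step_rel (dA : PySem.Dict String (List (String × String)))
    (dB : PySem.Dict String (List (List (String × String))))
    (p : List (String × String)) (h : pvRel dA dB) :
    pvRel (pyStepA dA p) (pyStepB dB p) := by
  obtain ⟨hkeys, hnd, hget⟩ := h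
  set r := (pvGetKey p "review").getD "" with hr
  have hcont : dA.contains r = dB.contains r := by
    rw [PySem.Dict.contains_eq_decide_mem_keys, PySem.Dict.contains_eq_decide_mem_keys, hkeys]
  by_cases hc : dA.contains r = true
  · -- review already present
    have hcB : dB.contains r = true := hcont ▸ hc
    have hsome : (dA.get? r).isSome := by rw [← PySem.Dict.contains_eq_isSome_get?]; exact hc
    obtain ⟨m, hm⟩ := Option.isSome_iff_exists.mp hsome
    have hgetD : dA.getD r [] = m := PySem.Dict.getD_of_get?_eq_some dA [] hm
    have hmax : PySem.List.max? (dB.getD r []) pvEntLen = some m := by rw [← hget, hm]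
    have hBkeys : (pyStepB dB p).keys = dB.keys := by
      rw [pyStepB, PySem.Dict.keys_modify, PySem.Dict.keys_insert_of_contains _ _ hcB]
    have hBgetD : ∀ k, (pyStepB dB p).getD k [] =
        if k = r then dB.getD r [] ++ [p] else dB.getD k [] := by
      intro k; rw [pyStepB, PySem.Dict.getD_modify]
    by_cases hlen : PySem.Str.len ((pvGetKey p "entity").getD "") >
        PySem.Str.len ((pvGetKey (dA.getD r []) "entity").getD "")
    · -- replace
      have hA : pyStepA dA p = dA.insert r p := by
        rw [pyStepA]; simp only [← hr, hc, if_pos, hlen]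
      refine ⟨?_, ?_, ?_⟩
      · rw [hA, PySem.Dict.keys_insert_of_contains _ _ hc, hkeys, hBkeys]
      · rw [hA, PySem.Dict.keys_insert_of_contains _ _ hc]; exact hnd
      · intro k
        rw [hA, PySem.Dict.get?_insert, hBgetD k]
        by_cases hk : k = r
        · subst hk
          have hlt : pvEntLen m < pvEntLen p := by
            simpa [pvEntLen, hgetD] using hlen
          rw [if_pos rfl, if_pos rfl, pv_max?_append_singleton, hmax]
          simp [hlt]
        · simp only [if_neg hk]; exact hget k
    · -- keep existing
      have hA : pyStepA dA p = dA := by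
        rw [pyStepA]; simp only [← hr, hc, if_pos, hlen, if_false]
      refine ⟨?_, ?_, ?_⟩
      · rw [hA, hkeys, hBkeys]
      · rw [hA]; exact hnd
      · intro k
        rw [hA, hBgetD k]
        by_cases hk : k = r
        · subst hk
          have hlt : ¬ pvEntLen m < pvEntLen p := by
            simpa [pvEntLen, hgetD] using hlen
          rw [if_pos rfl, pv_max?_append_singleton, hmax, hm]
          simp [hlt]
        · simp only [if_neg hk]; exact hget k
  · -- new review key
    have hcB : dB.contains r = false := by
      rw [← hcont]; exact Bool.eq_false_iff.mpr hc
    have hc' : dA.contains r = false := Bool.eq_false_iff.mpr hc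
    have hA : pyStepA dA p = dA.insert r p := by
      rw [pyStepA]; simp only [← hr, hc', Bool.false_eq_true, if_false]
    have hBempty : dB.getD r [] = [] := PySem.Dict.getD_of_not_contains dB [] hcB
    have hrmem : r ∉ dA.keys := by
      intro hmem
      have := (PySem.Dict.contains_iff_mem_keys dA r).mpr hmem
      rw [hc'] at this; exact Bool.false_ne_true this
    have hBkeys : (pyStepB dB p).keys = dB.keys ++ [r] := by
      rw [pyStepB, PySem.Dict.keys_modify, PySem.Dict.keys_insert_of_not_contains _ _ hcB]
    have hBgetD : ∀ k, (pyStepB dB p).getD k [] =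
        if k = r then dB.getD r [] ++ [p] else dB.getD k [] := by
      intro k; rw [pyStepB, PySem.Dict.getD_modify]
    refine ⟨?_, ?_, ?_⟩
    · rw [hA, PySem.Dict.keys_insert_of_not_contains _ _ hc', hkeys, hBkeys]
    · rw [hA, PySem.Dict.keys_insert_of_not_contains _ _ hc']
      rw [List.nodup_append]
      refine ⟨hnd, List.nodup_singleton r, ?_⟩
      intro a ha b hb
      rw [List.mem_singleton] at hb
      subst hb
      exact fun he => hrmem (he ▸ ha)
    · intro k
      rw [hA, PySem.Dict.get?_insert, hBgetD k]
      by_cases hk : k = r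
      · subst hk
        simp [hBempty, PySem.List.max?]
      · simp only [if_neg hk]; exact hget k

theorem pv_loop_rel (l : List (List (String × String))) :
    ∀ (dA : PySem.Dict String (List (String × String)))
      (dB : PySem.Dict String (List (List (String × String)))), pvRel dA dB →
      pvRel (l.foldl pyStepA dA) (l.foldl pyStepB dB) := by
  induction l with
  | nil => intro dA dB h; exact h
  | cons p t ih => intro dA dB h; exact ih _ _ (pv_step_rel dA dB p h)

-- ===== VERDICT (by name: the statement is the Claim_ definition above) =====
theorem remove_duplicate_reviews_spec : Claim_equal_remove_duplicate_reviews := by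
  intro l _ _
  unfold Spec_remove_duplicate_reviews remove_duplicate_reviews remove_duplicate_reviews_alt
  have hrel : pvRel (l.foldl pyStepA PySem.Dict.empty) (l.foldl pyStepB PySem.Dict.empty) := by
    apply pv_loop_rel
    refine ⟨rfl, PySem.Dict.nodup_keys_empty, ?_⟩
    intro k
    simp [PySem.Dict.get?_empty, PySem.Dict.getD_empty, PySem.List.max?]
  obtain ⟨hkeys, hnd, hget⟩ := hrel
  have hndB : (l.foldl pyStepB PySem.Dict.empty).keys.Nodup := hkeys ▸ hnd
  rw [PySem.Dict.values_eq_map_keys _ hnd ([] : List (String × String)),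
      PySem.Dict.values_eq_map_keys _ hndB ([] : List (List (String × String))),
      List.map_map, hkeys]
  apply List.map_congr_left
  intro k _
  simp only [Function.comp]
  rw [PySem.Dict.getD_eq_get?_getD, hget k]
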